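-- pv_equiv track=rewrite | github.com/Yong-Zhuang/Tutoring | Coding/Amazon/power-armor-game.py | findMinHealth
-- ===== SOURCE A (Python) =====
-- def findMinHealth(power, armor):
--     n = len(power)
--     ans = 0
--     arm = True
--     maxPower = 0
--     for i in range(n):
--         if power[i] > armor and arm == True:
--             ans += power[i] - armor
--             arm = False
--         else:
--             ans += power[i]
--         maxPower = max(maxPower, power[i])
--     if arm == True:
--         ans -= maxPower
--         arm = False
--     return ans + 1
-- ===== SOURCE B (Python) =====
-- def findMinHealth(power, armor):
--     total = sum(power)
--     if not power:
--         return total + 1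
--     m = max(power)
--     saving = armor if m > armor else max(m, 0)
--     return total - saving + 1
-- ===== Notes on version B (the rewrite author's own statement) =====
-- stated objective: simpler
-- what changed: Replaces A's flag-threaded single pass with a closed-form decision over precomputed aggregates (sum and max via builtins): saving = armor if max(power) > armor else max(max(power), 0), answer = sum(power) - saving + 1.
import Mathlib
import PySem

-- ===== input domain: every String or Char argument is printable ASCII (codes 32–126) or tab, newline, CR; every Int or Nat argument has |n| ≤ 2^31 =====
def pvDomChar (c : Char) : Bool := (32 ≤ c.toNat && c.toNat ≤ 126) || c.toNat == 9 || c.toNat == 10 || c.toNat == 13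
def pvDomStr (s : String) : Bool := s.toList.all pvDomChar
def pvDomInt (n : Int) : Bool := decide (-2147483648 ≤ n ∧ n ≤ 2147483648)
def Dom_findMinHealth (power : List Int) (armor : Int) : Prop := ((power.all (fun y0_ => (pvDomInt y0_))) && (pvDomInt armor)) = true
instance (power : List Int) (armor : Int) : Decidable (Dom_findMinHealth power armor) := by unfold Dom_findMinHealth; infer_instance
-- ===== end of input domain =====

-- B replaces A's flag-threaded single pass by a closed-form decision over sum(power) and max(power) (simpler).


-- ===== PORT A =====
-- for i in range(n): reads power[i] in order; ported as a fold over power with state (ans, arm, maxPower)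
def findMinHealth (power : List Int) (armor : Int) : Int :=
  let s := power.foldl (fun (st : Int × Bool × Int) p =>
      if p > armor ∧ st.2.1 = true then (st.1 + (p - armor), false, max st.2.2 p)
      else (st.1 + p, st.2.1, max st.2.2 p))
    ((0 : Int), true, (0 : Int))
  let ans := if s.2.1 = true then s.1 - s.2.2 else s.1
  ans + 1

-- ===== PORT B =====
def findMinHealth_alt (power : List Int) (armor : Int) : Int :=
  let total := power.sum
  match power with
  | [] => total + 1
  | _ :: _ =>
    let m := (PySem.List.max? power (fun y => y)).getD 0   -- max(power); power nonempty so some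
    let saving := if m > armor then armor else max m 0
    total - saving + 1

-- ===== PRECONDITION & SPEC =====
def Spec_findMinHealth (power : List Int) (armor : Int) (out : Int) : Prop := out = findMinHealth_alt power armor
instance (power : List Int) (armor : Int) (out : Int) : Decidable (Spec_findMinHealth power armor out) := by unfold Spec_findMinHealth; infer_instance

-- ===== CLAIM (what is proved, stated in full; the proofs are below) =====
def Claim_equal_findMinHealth : Prop := ∀ (power : List Int) (armor : Int), Dom_findMinHealth power armor → Spec_findMinHealth power armor (findMinHealth power armor)

-- ===== LEMMAS AND PROOFS =====

-- once the armor flag is down, the loop just adds the elements and tracks the running max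
theorem pvFoldFalse (armor : Int) (l : List Int) (a mp : Int) :
    l.foldl (fun (st : Int × Bool × Int) p =>
      if p > armor ∧ st.2.1 = true then (st.1 + (p - armor), false, max st.2.2 p)
      else (st.1 + p, st.2.1, max st.2.2 p)) (a, false, mp)
    = (a + l.sum, false, l.foldl max mp) := by
  induction l generalizing a mp with
  | nil => simp
  | cons p ps ih => simp [ih]; ring

-- with the flag up, the loop pays armor once iff some element exceeds armor
theorem pvFoldTrue (armor : Int) (l : List Int) (a mp : Int) :
    l.foldl (fun (st : Int × Bool × Int) p =>
      if p > armor ∧ st.2.1 = true then (st.1 + (p - armor), false, max st.2.2 p)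
      else (st.1 + p, st.2.1, max st.2.2 p)) (a, true, mp)
    = if ∃ x ∈ l, x > armor then (a + l.sum - armor, false, l.foldl max mp)
      else (a + l.sum, true, l.foldl max mp) := by
  induction l generalizing a mp with
  | nil => simp
  | cons p ps ih =>
    by_cases hp : p > armor
    · simp [hp, pvFoldFalse]
      ring
    · simp [List.foldl_cons, hp, ih]
      by_cases hex : ∃ x ∈ ps, x > armor
      · simp [hex]
        ring
      · simp [hex]
        ring

-- folding max from a 0 seed is the clamped-at-0 max of the list
theorem pvFold0 (l : List Int) (p : Int) :
    List.foldl max (max 0 p) l = max (List.foldl max p l) 0 := by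
  induction l generalizing p with
  | nil => exact max_comm 0 p
  | cons q qs ih =>
    simp only [List.foldl_cons]
    rw [max_assoc]
    exact ih (max p q)

theorem pvMaxGt (l : List Int) (x armor : Int) :
    armor < l.foldl max x ↔ (armor < x ∨ ∃ y ∈ l, armor < y) := by
  induction l generalizing x with
  | nil => simp
  | cons p ps ih =>
    simp [List.foldl_cons, ih]
    tauto

-- ===== VERDICT (by name: the statement is the Claim_ definition above) =====
theorem findMinHealth_spec : Claim_equal_findMinHealth := by
  intro power armor _
  unfold Spec_findMinHealth findMinHealth findMinHealth_alt
  cases power with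
  | nil => simp
  | cons p ps =>
    rw [pvFoldTrue, PySem.List.max?_id_cons]
    by_cases hex : ∃ x ∈ p :: ps, x > armor
    · rw [if_pos hex]
      have hm : armor < ps.foldl max p := by
        rw [pvMaxGt]
        rcases hex with ⟨x, hx, hxa⟩
        rcases List.mem_cons.mp hx with rfl | hx
        · exact Or.inl hxa
        · exact Or.inr ⟨x, hx, hxa⟩
      simp [hm]
    · rw [if_neg hex]
      have hm : ¬ armor < ps.foldl max p := by
        rw [pvMaxGt]
        push Not
        push Not at hex
        exact ⟨hex p (List.mem_cons_self), fun y hy => hex y (List.mem_cons_of_mem _ hy)⟩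
      simp [hm, pvFold0]
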